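-- pv_equiv track=rewrite | github.com/pypi-data/pypi-mirror-93 | packages/rantanplan/rantanplan-0.6.0.tar.gz/rantanplan-0.6.0/src/rantanplan/structures.py | get_rhyme_pattern_counts
-- ===== SOURCE A (Python) =====
-- def get_rhyme_pattern_counts(string):
--     """Count how many times does a character occur in a given string before its
--     own position.
--
--     :param string: String with the rhyme pattern
--     :return: A string with the count values
--     """
--     count_dict = {}
--     output = []
--     for character in string:
--         count = count_dict.get(character, 0)
--         output.append(count)
--         count_dict[character] = count + 1
--     return output
-- ===== SOURCE B (Python) =====
-- def get_rhyme_pattern_counts(string):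
--     """Count how many times does a character occur in a given string before its
--     own position.
--
--     :param string: String with the rhyme pattern
--     :return: A string with the count values
--     """
--     output = [0] * len(string)
--     rank = 0
--     prev = None
--     for character, position in sorted((ch, i) for i, ch in enumerate(string)):
--         rank = rank + 1 if character == prev else 0
--         output[position] = rank
--         prev = character
--     return output
-- ===== Notes on version B (the rewrite author's own statement) =====
-- stated objective: alternative
-- what changed: Replaces A's single pass with a running dict of per-character counts by a sort-then-scan: sort (character, position) pairs so equal characters become contiguous with positions ascending, sweep them with a rank counter that resets on character change, and scatter the ranks back into the output by position.
import Mathlib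
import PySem

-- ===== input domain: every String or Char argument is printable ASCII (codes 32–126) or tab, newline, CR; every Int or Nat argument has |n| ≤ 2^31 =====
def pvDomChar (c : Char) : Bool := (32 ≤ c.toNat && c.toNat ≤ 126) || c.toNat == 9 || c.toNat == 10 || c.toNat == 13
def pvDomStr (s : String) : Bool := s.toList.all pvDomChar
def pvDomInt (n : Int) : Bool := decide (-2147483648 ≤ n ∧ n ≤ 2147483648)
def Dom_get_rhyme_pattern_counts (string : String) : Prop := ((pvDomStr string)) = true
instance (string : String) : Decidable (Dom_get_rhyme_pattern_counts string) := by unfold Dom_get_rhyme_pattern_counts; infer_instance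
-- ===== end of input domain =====

-- B replaces A's single pass with a running dict of counts by sort-then-scan: it sorts
-- (character, position) pairs, sweeps them with a rank counter that resets on character
-- change, and scatters the ranks back by position (alternative algorithm, same value).


-- ===== PORT A =====
def get_rhyme_pattern_counts (string : String) : List Int :=
  (string.toList.foldl
    (fun (st : PySem.Dict Char Int × List Int) character =>
      let count := st.1.getD character 0
      (st.1.insert character (count + 1), st.2 ++ [count]))
    (PySem.Dict.empty, [])).2

-- ===== PORT B =====
-- sorted((ch, i) for i, ch in enumerate(string)) sorts tuples lexicographically:
-- PySem.List.sorted2 with the two projections as keys (exact; indices are distinct).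
-- output[position] = rank: position comes from enumerate, so it is a nonnegative
-- in-range index and Python's list assignment is exactly List.set at position.toNat.
def get_rhyme_pattern_counts_alt (string : String) : List Int :=
  let s := string.toList
  let pairs := (PySem.List.enumerate s 0).map (fun p => (p.2, p.1))
  let sortedPairs := PySem.List.sorted2 pairs (fun p => p.1) (fun p => p.2)
  (sortedPairs.foldl
    (fun (st : List Int × Int × Option Char) p =>
      let rank : Int := if st.2.2 = some p.1 then st.2.1 + 1 else 0
      (st.1.set p.2.toNat rank, rank, some p.1))
    (List.replicate s.length 0, 0, none)).1

-- ===== PRECONDITION & SPEC =====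
def Spec_get_rhyme_pattern_counts (string : String) (out : List Int) : Prop := out = get_rhyme_pattern_counts_alt string
instance (string : String) (out : List Int) : Decidable (Spec_get_rhyme_pattern_counts string out) := by unfold Spec_get_rhyme_pattern_counts; infer_instance

-- ===== CLAIM (what is proved, stated in full; the proofs are below) =====
def Claim_equal_get_rhyme_pattern_counts : Prop := ∀ (string : String), Dom_get_rhyme_pattern_counts string → Spec_get_rhyme_pattern_counts string (get_rhyme_pattern_counts string)

-- ===== LEMMAS AND PROOFS =====

-- the prior-occurrence counts of suf given the already-seen prefix pre (A's value)
def priorCounts : List Char → List Char → List Int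
  | _, [] => []
  | pre, c :: suf => ((pre.count c : Nat) : Int) :: priorCounts (pre ++ [c]) suf

theorem portA_eq_priorCounts (suf : List Char) :
    ∀ (pre : List Char) (d : PySem.Dict Char Int) (acc : List Int),
      (∀ c, d.getD c 0 = ((pre.count c : Nat) : Int)) →
      (suf.foldl
        (fun (st : PySem.Dict Char Int × List Int) character =>
          let count := st.1.getD character 0
          (st.1.insert character (count + 1), st.2 ++ [count])) (d, acc)).2
        = acc ++ priorCounts pre suf := by
  induction suf with
  | nil => intro pre d acc _; simp [priorCounts]
  | cons c suf ih =>
    intro pre d acc hd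
    simp only [List.foldl_cons, priorCounts]
    rw [ih (pre ++ [c]) (d.insert c (d.getD c 0 + 1)) (acc ++ [d.getD c 0])]
    · rw [hd c]; simp
    · intro c'
      rw [PySem.Dict.getD_insert]
      by_cases h : c' = c
      · subst h; rw [hd c']; simp [List.count_append]
      · simp [h, hd c', List.count_append, Ne.symm]

theorem length_priorCounts (suf : List Char) :
    ∀ pre, (priorCounts pre suf).length = suf.length := by
  induction suf with
  | nil => intro pre; simp [priorCounts]
  | cons c suf ih => intro pre; simp [priorCounts, ih]

theorem priorCounts_getElem (suf : List Char) :
    ∀ (pre : List Char) (k : Nat) (hk : k < suf.length),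
      (priorCounts pre suf)[k]'(by rw [length_priorCounts]; exact hk)
        = (((pre ++ suf.take k).count (suf[k])) : Int) := by
  induction suf with
  | nil => intro pre k hk; simp at hk
  | cons c suf ih =>
    intro pre k hk
    cases k with
    | zero => simp [priorCounts]
    | succ k =>
      have hk' : k < suf.length := by simpa using hk
      simp only [priorCounts, List.getElem_cons_succ, List.take_succ_cons]
      rw [ih (pre ++ [c]) k hk']
      simp [List.append_assoc]

-- Python's tuple comparison: sorted2 on (char, index) pairs is sorted with the lexicographic key
theorem sorted2_eq_sorted_toLex (xs : List (Char × Int)) :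
    PySem.List.sorted2 xs (fun p => p.1) (fun p => p.2)
      = PySem.List.sorted xs (fun p => toLex p) := by
  simp only [PySem.List.sorted2, PySem.List.sorted]
  have hb : (fun (a b : Char × Int) => decide (a.1 < b.1) || (!decide (b.1 < a.1) && decide (a.2 < b.2)))
      = fun a b => decide ((toLex a : Lex (Char × Int)) < toLex b) := by
    funext a b
    rcases lt_trichotomy a.1 b.1 with h | h | h <;>
      simp [Prod.Lex.toLex_lt_toLex, h, lt_asymm]
  rw [hb]
  rfl

-- in a lexicographically sorted pair list, the processed prefix before x is
-- exactly the set of pairs lexicographically below x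
theorem mem_processed (R Q' : List (Char × Int)) (x q : Char × Int)
    (hpw : (R ++ x :: Q').Pairwise (fun a b => toLex a < toLex b)) :
    q ∈ R ↔ q ∈ R ++ x :: Q' ∧ toLex q < toLex x := by
  rw [List.pairwise_append] at hpw
  constructor
  · intro hq
    exact ⟨List.mem_append_left _ hq, hpw.2.2 q hq x (List.mem_cons_self)⟩
  · rintro ⟨hm, hlt⟩
    rcases List.mem_append.mp hm with h | h
    · exact h
    · rcases List.mem_cons.mp h with rfl | h
      · exact absurd hlt (lt_irrefl _)
      · exact absurd hlt (not_lt_of_gt ((List.pairwise_cons.mp hpw.2.1).1 q h))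

theorem count_take (s : List Char) (c : Char) :
    ∀ (k : Nat), k ≤ s.length →
      (s.take k).count c = (List.range k).countP (fun j => decide (s[j]? = some c)) := by
  intro k
  induction k with
  | zero => intro _; simp
  | succ k ih =>
    intro hk
    have hk' : k < s.length := by omega
    rw [List.take_add_one, List.range_succ, List.count_append, List.countP_append,
      ih (by omega), List.getElem?_eq_getElem hk']
    have h1 : List.count c (some s[k]).toList = if s[k] = c then 1 else 0 := by
      simp [List.count_cons, beq_iff_eq]
    have h2 : List.countP (fun j => decide (s[j]? = some c)) [k] = if s[k] = c then 1 else 0 := by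
      simp [List.countP_cons, List.getElem?_eq_getElem hk', eq_comm]
    rw [h1, h2]

theorem nodup_of_pairwise_lt (R : List (Char × Int))
    (h : R.Pairwise (fun a b => toLex a < toLex b)) : R.Nodup := by
  refine h.imp ?_
  rintro a b hlt rfl
  exact absurd hlt (lt_irrefl _)

-- the pairs before (s[k₀], k₀) carrying character s[k₀] are exactly its occurrences below k₀
theorem count_processed (s : List Char) (R Q' : List (Char × Int)) (k₀ : Nat) (hk₀ : k₀ < s.length)
    (hmem : ∀ p, p ∈ R ++ (s[k₀], (k₀ : Int)) :: Q' ↔ ∃ (k : Nat) (h : k < s.length), p = (s[k], (k : Int)))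
    (hpw : (R ++ (s[k₀], (k₀ : Int)) :: Q').Pairwise (fun a b => toLex a < toLex b)) :
    R.countP (fun r => decide (r.1 = s[k₀])) = (s.take k₀).count (s[k₀]) := by
  have hR : R.Nodup := nodup_of_pairwise_lt R ((List.pairwise_append.mp hpw).1)
  have hMnodup : (((List.range k₀).filter (fun j => decide (s[j]? = some s[k₀]))).map
      (fun (j : Nat) => ((s[k₀], (j : Int)) : Char × Int))).Nodup := by
    refine List.Nodup.map ?_ ((List.nodup_range).filter _)
    intro a b hab
    have : ((a : Int)) = (b : Int) := congrArg Prod.snd hab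
    exact_mod_cast this
  have hperm : (R.filter (fun r => decide (r.1 = s[k₀]))).Perm
      (((List.range k₀).filter (fun j => decide (s[j]? = some s[k₀]))).map
        (fun (j : Nat) => ((s[k₀], (j : Int)) : Char × Int))) := by
    rw [List.perm_ext_iff_of_nodup (hR.filter _) hMnodup]
    intro q
    rw [List.mem_filter, List.mem_map]
    constructor
    · rintro ⟨hq, hc⟩
      obtain ⟨hq', hlt⟩ := (mem_processed R Q' _ q hpw).mp hq
      obtain ⟨k, hk, rfl⟩ := (hmem q).mp hq'
      have hc' : s[k] = s[k₀] := by simpa using hc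
      have hkk : k < k₀ := by
        rcases Prod.Lex.toLex_lt_toLex.mp hlt with h | ⟨_, h⟩
        · rw [hc'] at h; exact absurd h (lt_irrefl _)
        · simp only at h; exact_mod_cast h
      refine ⟨k, ?_, by rw [hc']⟩
      rw [List.mem_filter]
      exact ⟨List.mem_range.mpr hkk, by simp [List.getElem?_eq_getElem hk, hc']⟩
    · rintro ⟨j, hj, rfl⟩
      rw [List.mem_filter, List.mem_range] at hj
      obtain ⟨hjk, hjc⟩ := hj
      have hjn : j < s.length := by omega
      have hsj : s[j] = s[k₀] := by
        have := of_decide_eq_true hjc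
        rw [List.getElem?_eq_getElem hjn] at this
        exact Option.some.inj this
      refine ⟨(mem_processed R Q' _ _ hpw).mpr ⟨(hmem _).mpr ⟨j, hjn, by rw [hsj]⟩, ?_⟩, by simp⟩
      exact Prod.Lex.toLex_lt_toLex.mpr (Or.inr ⟨rfl, by simp only; exact_mod_cast hjk⟩)
  rw [List.countP_eq_length_filter, hperm.length_eq, List.length_map,
    ← List.countP_eq_length_filter, count_take s (s[k₀]) k₀ (le_of_lt hk₀)]

-- the rank update equals the number of already-processed pairs with x's character
theorem rank_step (R Q' : List (Char × Int)) (x : Char × Int) (rank : Int) (prev : Option Char)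
    (hpw : (R ++ x :: Q').Pairwise (fun a b => toLex a < toLex b))
    (hprev : match R.getLast? with
      | none => prev = none
      | some q => prev = some q.1 ∧ rank = (R.countP (fun r => decide (r.1 = q.1)) : Int) - 1) :
    (if prev = some x.1 then rank + 1 else 0) = (R.countP (fun r => decide (r.1 = x.1)) : Int) := by
  rcases List.eq_nil_or_concat R with rfl | ⟨R₀, l, rfl⟩
  · simp at hprev; simp [hprev]
  · rw [List.concat_eq_append] at hpw
    rw [List.concat_eq_append, List.getLast?_concat] at hprev
    obtain ⟨hp, hr⟩ := hprev
    rw [List.concat_eq_append]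
    by_cases hc : l.1 = x.1
    · rw [hp, hc, if_pos rfl, hr, hc]; ring
    · rw [hp, if_neg (by simpa using hc)]
      have hzero : (R₀ ++ [l]).countP (fun r => decide (r.1 = x.1)) = 0 := by
        rw [List.countP_eq_zero]
        have hpw' := hpw
        rw [List.append_assoc, List.pairwise_append] at hpw'
        have hlx : toLex l < toLex x := by
          have h := hpw'.2.1
          simp only [List.singleton_append] at h
          exact (List.pairwise_cons.mp h).1 x (List.mem_cons_self)
        have hl1 : l.1 < x.1 := by
          rcases Prod.Lex.toLex_lt_toLex.mp hlx with h | ⟨h, _⟩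
          · exact h
          · exact absurd h hc
        intro q hq
        rcases List.mem_append.mp hq with h | h
        · have hql : toLex q < toLex l := by
            have := (List.pairwise_append.mp hpw).1
            rw [List.pairwise_append] at this
            exact this.2.2 q h l (by simp)
          have : q.1 ≤ l.1 := by
            rcases Prod.Lex.toLex_lt_toLex.mp hql with h' | ⟨h', _⟩
            · exact le_of_lt h'
            · exact le_of_eq h'
          simp [ne_of_lt (lt_of_le_of_lt this hl1)]
        · rcases List.mem_singleton.mp h with rfl
          simp [hc]
      rw [hzero]; simp

-- the scatter sweep: after processing Q (with R already processed), every processed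
-- position holds its prior-occurrence count, the rest still hold 0
theorem scatter_inv (s : List Char) (Q : List (Char × Int)) :
    ∀ (R : List (Char × Int)) (out : List Int) (rank : Int) (prev : Option Char),
      (∀ p, p ∈ R ++ Q ↔ ∃ (k : Nat) (h : k < s.length), p = (s[k], (k : Int))) →
      (R ++ Q).Pairwise (fun a b => toLex a < toLex b) →
      out.length = s.length →
      (∀ (k : Nat) (hk : k < s.length),
        out[k]? = some (if (s[k], (k : Int)) ∈ R then ((s.take k).count (s[k]) : Int) else 0)) →
      (match R.getLast? with
       | none => prev = none
       | some q => prev = some q.1 ∧ rank = (R.countP (fun r => decide (r.1 = q.1)) : Int) - 1) →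
      (Q.foldl
        (fun (st : List Int × Int × Option Char) p =>
          let r : Int := if st.2.2 = some p.1 then st.2.1 + 1 else 0
          (st.1.set p.2.toNat r, r, some p.1)) (out, rank, prev)).1.length = s.length ∧
      ∀ (k : Nat) (hk : k < s.length),
        (Q.foldl
          (fun (st : List Int × Int × Option Char) p =>
            let r : Int := if st.2.2 = some p.1 then st.2.1 + 1 else 0
            (st.1.set p.2.toNat r, r, some p.1)) (out, rank, prev)).1[k]?
          = some (if (s[k], (k : Int)) ∈ R ++ Q then ((s.take k).count (s[k]) : Int) else 0) := by
  induction Q with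
  | nil =>
    intro R out rank prev hmem hpw hlen hout hprev
    simp only [List.foldl_nil]
    exact ⟨hlen, fun k hk => by simpa using hout k hk⟩
  | cons x Q' ih =>
    intro R out rank prev hmem hpw hlen hout hprev
    obtain ⟨k₀, hk₀, hx⟩ := (hmem x).mp (List.mem_append_right R (List.mem_cons_self))
    subst hx
    simp only [List.foldl_cons]
    have hr : (if prev = some (s[k₀], (k₀ : Int)).1 then rank + 1 else 0)
        = (R.countP (fun r => decide (r.1 = s[k₀])) : Int) :=
      rank_step R Q' _ rank prev hpw hprev
    have hcnt : R.countP (fun r => decide (r.1 = s[k₀])) = (s.take k₀).count (s[k₀]) :=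
      count_processed s R Q' k₀ hk₀ hmem hpw
    have hrw : (R ++ [(s[k₀], (k₀ : Int))]) ++ Q' = R ++ (s[k₀], (k₀ : Int)) :: Q' := by
      simp
    have hres := ih (R ++ [(s[k₀], (k₀ : Int))])
      (out.set ((k₀ : Int)).toNat (if prev = some (s[k₀], (k₀ : Int)).1 then rank + 1 else 0))
      (if prev = some (s[k₀], (k₀ : Int)).1 then rank + 1 else 0)
      (some (s[k₀], (k₀ : Int)).1)
      (by rw [hrw]; exact hmem)
      (by rw [hrw]; exact hpw)
      (by rw [List.length_set]; exact hlen)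
      ?_ ?_
    · refine ⟨hres.1, fun k hk => ?_⟩
      rw [hres.2 k hk]
      congr 1
      rw [hrw]
    · -- hout for the new out
      intro k hk
      simp only [Int.toNat_natCast]
      by_cases hkk : k = k₀
      · subst hkk
        rw [List.getElem?_set_self (by omega),
          if_pos (List.mem_append_right R (List.mem_singleton.mpr rfl))]
        congr 1
        rw [hr, hcnt]
      · rw [List.getElem?_set_ne (by omega)]
        rw [hout k hk]
        have : ((s[k], (k : Int)) ∈ R ++ [(s[k₀], (k₀ : Int))]) ↔ (s[k], (k : Int)) ∈ R := by
          rw [List.mem_append]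
          constructor
          · rintro (h | h)
            · exact h
            · exfalso
              rcases List.mem_singleton.mp h with h
              have : (k : Int) = (k₀ : Int) := congrArg Prod.snd h
              exact hkk (by exact_mod_cast this)
          · exact Or.inl
        exact congrArg some (if_congr this.symm rfl rfl)
    · -- prev invariant for the new state
      rw [List.getLast?_concat]
      refine ⟨rfl, ?_⟩
      rw [List.countP_append]
      have h1 : List.countP (fun r => decide (r.1 = (s[k₀], (k₀ : Int)).1)) [(s[k₀], (k₀ : Int))] = 1 := by
        simp
      simp only at h1 ⊢
      rw [h1, hr]
      push_cast
      ring

theorem pairs_mem (s : List Char) (p : Char × Int) :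
    p ∈ (PySem.List.enumerate s 0).map (fun q => (q.2, q.1)) ↔
      ∃ (k : Nat) (h : k < s.length), p = (s[k], (k : Int)) := by
  rw [List.mem_map]
  constructor
  · rintro ⟨q, hq, rfl⟩
    obtain ⟨k, hk, rfl⟩ := (PySem.List.mem_enumerate_iff s 0 q).mp hq
    exact ⟨k, hk, by simp⟩
  · rintro ⟨k, hk, rfl⟩
    exact ⟨((k : Int), s[k]), (PySem.List.mem_enumerate_iff s 0 _).mpr ⟨k, hk, by simp⟩, rfl⟩

theorem pairs_nodup (s : List Char) :
    ((PySem.List.enumerate s 0).map (fun q => (q.2, q.1)) : List (Char × Int)).Nodup := by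
  refine List.Nodup.map ?_ ?_
  · intro a b hab
    exact Prod.ext (congrArg Prod.snd hab) (congrArg Prod.fst hab)
  · refine ((PySem.List.pairwise_lt_enumerate s 0).imp ?_)
    rintro a b hlt rfl
    exact absurd hlt (lt_irrefl _)

-- ===== VERDICT (by name: the statement is the Claim_ definition above) =====
theorem get_rhyme_pattern_counts_spec : Claim_equal_get_rhyme_pattern_counts := by
  intro string _
  unfold Spec_get_rhyme_pattern_counts get_rhyme_pattern_counts get_rhyme_pattern_counts_alt
  rw [portA_eq_priorCounts string.toList [] PySem.Dict.empty []
    (by intro c; simp [PySem.Dict.getD])]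
  simp only [List.nil_append, sorted2_eq_sorted_toLex]
  have hmem : ∀ p, p ∈ ([] : List (Char × Int)) ++
      PySem.List.sorted ((PySem.List.enumerate string.toList 0).map (fun q => (q.2, q.1)))
        (fun p => toLex p) ↔
      ∃ (k : Nat) (h : k < string.toList.length), p = (string.toList[k], (k : Int)) := by
    intro p
    rw [List.nil_append,
      (PySem.List.sorted_perm ((PySem.List.enumerate string.toList 0).map (fun q => (q.2, q.1)))
        (fun p => toLex p) false).mem_iff]
    exact pairs_mem string.toList p
  have hpw : (([] : List (Char × Int)) ++
      PySem.List.sorted ((PySem.List.enumerate string.toList 0).map (fun q => (q.2, q.1)))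
        (fun p => toLex p)).Pairwise (fun a b => toLex a < toLex b) := by
    rw [List.nil_append]
    have hle := PySem.List.sorted_pairwise
      ((PySem.List.enumerate string.toList 0).map (fun q => (q.2, q.1))) (fun p => toLex p)
    have hnd : (PySem.List.sorted ((PySem.List.enumerate string.toList 0).map (fun q => (q.2, q.1)))
        (fun p => toLex p)).Nodup := by
      rw [(PySem.List.sorted_perm _ _ false).nodup_iff]
      exact pairs_nodup string.toList
    refine (hle.and hnd).imp ?_
    rintro a b ⟨hab, hne⟩
    exact lt_of_le_of_ne hab (fun h => hne (toLex_inj.mp h))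
  have hout0 : ∀ (k : Nat) (hk : k < string.toList.length),
      (List.replicate string.toList.length (0 : Int))[k]?
        = some (if (string.toList[k]'(by omega), (k : Int)) ∈ ([] : List (Char × Int))
            then ((string.toList.take k).count (string.toList[k]'(by omega)) : Int) else 0) := by
    intro k hk
    rw [List.getElem?_replicate, if_pos hk, if_neg (List.not_mem_nil)]
  obtain ⟨hlen, helem⟩ := scatter_inv string.toList
    (PySem.List.sorted ((PySem.List.enumerate string.toList 0).map (fun q => (q.2, q.1)))
      (fun p => toLex p))
    [] (List.replicate string.toList.length 0) 0 none hmem hpw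
    (List.length_replicate) hout0 rfl
  refine List.ext_getElem (by rw [length_priorCounts, hlen]) ?_
  intro k h1 h2
  have hk : k < string.toList.length := by rwa [length_priorCounts] at h1
  have hv := helem k hk
  rw [if_pos ((hmem _).mpr ⟨k, hk, rfl⟩)] at hv
  rw [List.getElem?_eq_getElem h2] at hv
  rw [priorCounts_getElem string.toList [] k hk, List.nil_append]
  exact (Option.some.inj hv).symm
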